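-- pv_equiv track=rewrite | github.com/UnfriendlyMonkey/leetcode | binary-watch.py | readBinaryWatch2
-- ===== SOURCE A (Python) =====
-- def readBinaryWatch2(turnedOn: int) -> list[str]:
--     output = []
--
--     def count(x):
--         # don't know why it works this way
--         c = 0
--         while x:
--             c += x % 2
--             x = x // 2
--         return c
--
--     # Loop through all possible combinations of hours and minutes and count the number of set bits
--     for h in range(12):
--         for m in range(60):
--             # Check if the number of set bits in hours and minutes equals the target number
--             if count(h) + count(m) == turnedOn:
--                 # Add the valid combination of hours and minutes to the output list
--                 output.append(f"{h}:{m:02d}")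
--     return output
-- ===== SOURCE B (Python) =====
-- def readBinaryWatch2(turnedOn: int) -> list[str]:
--     def popcnt(x):
--         return 0 if x == 0 else x % 2 + popcnt(x // 2)
--
--     # group the minutes 0..59 by their popcount, in ascending order
--     by_count = {}
--     for m in range(60):
--         by_count.setdefault(popcnt(m), []).append(m)
--
--     out = []
--     for h in range(12):
--         for m in by_count.get(turnedOn - popcnt(h), []):
--             out.append(f"{h}:{m:02d}")
--     return out
-- ===== Notes on version B (the rewrite author's own statement) =====
-- stated objective: alternative
-- what changed: B precomputes a dict grouping minutes 0..59 by popcount once, then for each hour looks up exactly the minutes with the complementary popcount, replacing A's inner scan-all-60-minutes-and-filter loop with a table lookup that iterates only the matching minutes.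
import Mathlib
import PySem

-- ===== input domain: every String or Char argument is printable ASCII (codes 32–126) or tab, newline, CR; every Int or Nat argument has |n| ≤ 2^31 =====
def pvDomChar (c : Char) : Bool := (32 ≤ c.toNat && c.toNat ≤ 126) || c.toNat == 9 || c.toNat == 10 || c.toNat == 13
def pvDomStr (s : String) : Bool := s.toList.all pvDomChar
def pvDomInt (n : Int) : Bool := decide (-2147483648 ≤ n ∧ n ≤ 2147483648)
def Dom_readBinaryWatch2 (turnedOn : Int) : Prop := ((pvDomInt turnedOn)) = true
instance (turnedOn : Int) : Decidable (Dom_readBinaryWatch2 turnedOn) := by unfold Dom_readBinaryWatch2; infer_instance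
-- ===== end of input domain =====

-- B replaces A's inner scan-all-60-minutes-and-filter loop by a one-time dict grouping the
-- minutes by popcount, so each hour only iterates its matching minutes (objective: alternative).

-- ===== PORT A =====
-- A's 'while x: c += x % 2; x = x // 2' accumulator loop; the guard '0 < x' (vs Python's 'x != 0')
-- only totalizes it: Python's loop diverges for negative x, and it is only ever called on 0..59.
def countAgo : Nat → Int → Int → Int
  | 0, _, c => c
  | fuel + 1, x, c =>
    if 0 < x then countAgo fuel (PySem.Int.floordiv x 2) (c + PySem.Int.mod x 2) else c

def countA (x : Int) : Int := countAgo 64 x 0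

-- f"{h}:{m:02d}" (exact for the nonnegative h, m this program formats)
def fmtA (h m : Int) : String :=
  String.ofList (PySem.Int.toChars h ++ ':' :: PySem.Chars.zfill (PySem.Int.toChars m) 2)

def readBinaryWatch2 (turnedOn : Int) : List String :=
  (PySem.List.pyRange 0 12 1).foldl (fun output h =>
    (PySem.List.pyRange 0 60 1).foldl (fun output m =>
      if countA h + countA m == turnedOn then output ++ [fmtA h m] else output) output) []

-- ===== PORT B =====
-- Source B's 'return 0 if x == 0 else x % 2 + popcnt(x // 2)'; guard '0 < x' (vs 'x == 0') only
-- totalizes it (Python diverges on negative x; only called on 0..59).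
def popcntBgo : Nat → Int → Int
  | 0, _ => 0
  | fuel + 1, x =>
    if 0 < x then PySem.Int.mod x 2 + popcntBgo fuel (PySem.Int.floordiv x 2) else 0

def popcntB (x : Int) : Int := popcntBgo 64 x

def fmtB (h m : Int) : String :=
  String.ofList (PySem.Int.toChars h ++ ':' :: PySem.Chars.zfill (PySem.Int.toChars m) 2)

def readBinaryWatch2_alt (turnedOn : Int) : List String :=
  -- by_count.setdefault(popcnt(m), []).append(m)  =  modify (popcnt m) [] (· ++ [m])
  let byCount : PySem.Dict Int (List Int) :=
    (PySem.List.pyRange 0 60 1).foldl (fun d m => d.modify (popcntB m) [] (· ++ [m])) PySem.Dict.empty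
  (PySem.List.pyRange 0 12 1).foldl (fun out h =>
    (byCount.getD (turnedOn - popcntB h) []).foldl (fun out m => out ++ [fmtB h m]) out) []

-- ===== PRECONDITION & SPEC =====
def Spec_readBinaryWatch2 (turnedOn : Int) (out : List String) : Prop := out = readBinaryWatch2_alt turnedOn
instance (turnedOn : Int) (out : List String) : Decidable (Spec_readBinaryWatch2 turnedOn out) := by unfold Spec_readBinaryWatch2; infer_instance

-- ===== CLAIM (what is proved, stated in full; the proofs are below) =====
def Claim_equal_readBinaryWatch2 : Prop := ∀ (turnedOn : Int), Dom_readBinaryWatch2 turnedOn → Spec_readBinaryWatch2 turnedOn (readBinaryWatch2 turnedOn)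

-- ===== LEMMAS AND PROOFS =====

-- every LED count reachable by an hour plus a minute lies in [0, 8]
lemma countA_bounds : ∀ h ∈ PySem.List.pyRange 0 12 1, ∀ m ∈ PySem.List.pyRange 0 60 1,
    0 ≤ countA h + countA m ∧ countA h + countA m ≤ 8 := by decide

lemma popcntB_hour_bounds : ∀ h ∈ PySem.List.pyRange 0 12 1,
    0 ≤ popcntB h ∧ popcntB h ≤ 3 := by decide

-- A returns [] when turnedOn is outside [0, 8]
lemma A_empty (t : Int) (ht : t < 0 ∨ 8 < t) : readBinaryWatch2 t = [] := by
  unfold readBinaryWatch2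
  have houter : ∀ hs : List Int, (∀ h ∈ hs, h ∈ PySem.List.pyRange 0 12 1) →
      ∀ acc : List String,
      hs.foldl (fun output h =>
        (PySem.List.pyRange 0 60 1).foldl (fun output m =>
          if countA h + countA m == t then output ++ [fmtA h m] else output) output) acc = acc := by
    intro hs
    induction hs with
    | nil => intro _ acc; rfl
    | cons h hs ih =>
      intro hmem acc
      simp only [List.foldl_cons]
      rw [PySem.List.foldl_append_if]
      have hfil : (PySem.List.pyRange 0 60 1).filter
          (fun m => countA h + countA m == t) = [] := by
        rw [List.filter_eq_nil_iff]
        intro m hm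
        have := countA_bounds h (hmem h (by simp)) m hm
        simp only [beq_iff_eq]
        omega
      rw [hfil]
      simp only [List.map_nil, List.append_nil]
      exact ih (fun x hx => hmem x (by simp [hx])) acc
  exact houter _ (fun x hx => hx) []

-- B returns [] when turnedOn is outside [0, 8]
set_option maxRecDepth 100000 in
lemma B_empty (t : Int) (ht : t < 0 ∨ 8 < t) : readBinaryWatch2_alt t = [] := by
  unfold readBinaryWatch2_alt
  simp only
  set byCount : PySem.Dict Int (List Int) :=
    (PySem.List.pyRange 0 60 1).foldl (fun d m => d.modify (popcntB m) [] (· ++ [m])) PySem.Dict.empty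
    with hbc
  have hkeys : byCount.keys = [0, 1, 2, 3, 4, 5] := by rw [hbc]; decide
  have hget : ∀ k : Int, (k < 0 ∨ 5 < k) → byCount.getD k [] = [] := by
    intro k hk
    apply PySem.Dict.getD_of_not_contains
    rw [PySem.Dict.contains_eq_decide_mem_keys, hkeys]
    rcases hk with hk | hk <;>
    · simp only [decide_eq_false_iff_not, List.mem_cons, List.not_mem_nil, or_false]
      push Not
      omega
  have houter : ∀ hs : List Int, (∀ h ∈ hs, h ∈ PySem.List.pyRange 0 12 1) →
      ∀ acc : List String,
      hs.foldl (fun out h =>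
        (byCount.getD (t - popcntB h) []).foldl (fun out m => out ++ [fmtB h m]) out) acc = acc := by
    intro hs
    induction hs with
    | nil => intro _ acc; rfl
    | cons h hs ih =>
      intro hmem acc
      simp only [List.foldl_cons]
      have hb := popcntB_hour_bounds h (hmem h (by simp))
      rw [hget (t - popcntB h) (by omega)]
      exact ih (fun x hx => hmem x (by simp [hx])) acc
  exact houter _ (fun x hx => hx) []

-- ===== VERDICT (by name: the statement is the Claim_ definition above) =====
set_option maxRecDepth 100000 in
theorem readBinaryWatch2_spec : Claim_equal_readBinaryWatch2 := by
  intro t _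
  unfold Spec_readBinaryWatch2
  by_cases h0 : 0 ≤ t ∧ t ≤ 8
  · obtain ⟨h1, h2⟩ := h0
    interval_cases t <;> decide
  · rw [A_empty t (by omega), B_empty t (by omega)]
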